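-- pv_equiv track=rewrite | github.com/prashanthr11/HackerRank | Problem Solving/Implementations/Lisa's Workbook.py | solve
-- ===== SOURCE A (Python) =====
-- def solve(l, m):
--     ret = list()
--
--     for i in l:
--         x = 1
--         while x + m <= i:
--             tmp = list()
--
--             for j in range(x, x + m):
--                 tmp.append(j)
--             x += m
--             ret.append(tmp)
--
--         qw = list()
--         for j in range(x, i + 1):
--             qw.append(j)
--         ret.append(qw)
--
--     return ret
-- ===== SOURCE B (Python) =====
-- def solve(l, m):
--     ret = []
--     for i in l:
--         buckets = {}
--         for j in range(1, i + 1):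
--             buckets.setdefault((j - 1) // m, []).append(j)
--         ret.extend(list(buckets.values()) or [[]])
--     return ret
-- ===== Notes on version B (the rewrite author's own statement) =====
-- stated objective: alternative
-- what changed: A emits pages page-by-page with a running start index (a while-loop for full m-sized pages plus a separate trailing loop for the last page); B instead iterates over the problems themselves, grouping each problem j into a dict bucket keyed by its page number (j-1)//m, and reads the pages off as the dict's values (one empty page when a chapter has no problems).
import Mathlib
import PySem

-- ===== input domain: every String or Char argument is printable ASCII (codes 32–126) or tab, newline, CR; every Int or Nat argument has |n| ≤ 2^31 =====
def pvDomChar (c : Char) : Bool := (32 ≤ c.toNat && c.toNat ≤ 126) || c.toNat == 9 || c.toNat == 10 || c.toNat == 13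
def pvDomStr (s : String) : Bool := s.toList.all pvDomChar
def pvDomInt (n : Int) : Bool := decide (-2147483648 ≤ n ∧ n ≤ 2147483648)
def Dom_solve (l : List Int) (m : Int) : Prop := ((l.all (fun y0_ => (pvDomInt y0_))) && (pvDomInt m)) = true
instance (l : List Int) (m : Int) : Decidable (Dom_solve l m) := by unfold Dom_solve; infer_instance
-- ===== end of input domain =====

-- B replaces A's page-by-page emission (while-loop over a running page start plus a
-- separate trailing loop for the last page) by a per-problem grouping pass: each problem j
-- is appended to a dict bucket keyed by its page number (j-1)//m and the pages are read
-- off as the dict's values (objective: alternative, same cost).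

-- ===== PORT A =====
-- A's inner while-loop; fuel is an upper bound on its iteration count (never exhausted
-- under Pre_solve, where the Python loop terminates). At fuel 0 we emit the trailing page.
def solveLoopA (fuel : Nat) (i m x : Int) : List (List Int) :=
  match fuel with
  | 0 => [PySem.List.pyRange x (i + 1) 1]
  | n + 1 =>
    if x + m ≤ i then
      PySem.List.pyRange x (x + m) 1 :: solveLoopA n i m (x + m)
    else
      [PySem.List.pyRange x (i + 1) 1]

def solve (l : List Int) (m : Int) : List (List Int) :=
  l.foldl (fun ret i => ret ++ solveLoopA (i.toNat + 1) i m 1) []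

-- ===== PORT B =====
-- one chapter: 'buckets.setdefault((j-1)//m, []).append(j)' is exactly
-- Dict.modify (PySem.Dict keeps insertion order, updates in place), and
-- 'list(buckets.values()) or [[]]' picks [[]] iff the values list is empty.
def solveChapterB (i m : Int) : List (List Int) :=
  let buckets :=
    (PySem.List.pyRange 1 (i + 1) 1).foldl
      (fun d j => d.modify (PySem.Int.floordiv (j - 1) m) [] (fun v => v ++ [j]))
      (PySem.Dict.empty : PySem.Dict Int (List Int))
  let vs := buckets.values
  if vs.isEmpty then [[]] else vs

def solve_alt (l : List Int) (m : Int) : List (List Int) :=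
  l.foldl (fun ret i => ret ++ solveChapterB i m) []

-- ===== PRECONDITION & SPEC =====
-- Pre_solve excludes exactly the inputs on which the Python A never returns: for m ≤ 0
-- and any chapter i > m the while-loop's counter x drifts downward (or stalls) and A
-- diverges; when m ≥ 1, or every i ≤ m, A terminates normally.
def Pre_solve (l : List Int) (m : Int) : Prop := 1 ≤ m ∨ ∀ i ∈ l, i ≤ m
instance (l : List Int) (m : Int) : Decidable (Pre_solve l m) := by unfold Pre_solve; infer_instance
def pvWitness_solve : List Int × Int := ([5, 0, 4], 2)

def Spec_solve (l : List Int) (m : Int) (out : List (List Int)) : Prop := out = solve_alt l m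
instance (l : List Int) (m : Int) (out : List (List Int)) : Decidable (Spec_solve l m out) := by unfold Spec_solve; infer_instance

-- ===== CLAIM (what is proved, stated in full; the proofs are below) =====
def Claim_equal_solve : Prop := ∀ (l : List Int) (m : Int), Dom_solve l m → Pre_solve l m → Spec_solve l m (solve l m)

-- ===== LEMMAS AND PROOFS =====

theorem pyRange_empty (a b : Int) (h : b ≤ a) : PySem.List.pyRange a b 1 = [] := by
  rw [PySem.List.pyRange_one]
  simp [show (b - a).toNat = 0 by omega]

-- ---- A side: the while-loop started at x yields consecutive pages (front induction) ----
theorem loopA_closed (m : Int) (hm : 1 ≤ m) :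
    ∀ (fuel : Nat) (n x : Int), x ≤ n → (n + 1 - x).toNat ≤ fuel →
      solveLoopA fuel n m x =
        (List.range ((PySem.Int.floordiv (n - x) m).toNat + 1)).map
          (fun (k : Nat) => PySem.List.pyRange (x + (k : Int) * m)
            (min (x + ((k : Int) + 1) * m) (n + 1)) 1) := by
  intro fuel
  induction fuel with
  | zero => intro n x hx hf; omega
  | succ f ih =>
    intro n x hx hf
    simp only [solveLoopA]
    by_cases h : x + m ≤ n
    · rw [if_pos h]
      set q' := PySem.Int.floordiv (n - x - m) m with hq'
      have hb := (PySem.Int.floordiv_eq_iff_of_pos (a := n - x - m) (b := m) (q := q') (by omega)).mp rfl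
      have hq0 : 0 ≤ q' := by nlinarith [hb.1, hb.2]
      have hq : PySem.Int.floordiv (n - x) m = q' + 1 := by
        rw [PySem.Int.floordiv_eq_iff_of_pos (by omega)]
        constructor <;> nlinarith [hb.1, hb.2]
      rw [hq, show (q' + 1).toNat + 1 = (q'.toNat + 1) + 1 by omega,
        List.range_succ_eq_map, List.map_cons, List.map_map]
      congr 1
      · congr 1
        · push_cast; ring
        · push_cast; omega
      · rw [ih n (x + m) (by omega) (by omega)]
        rw [show n - (x + m) = n - x - m by ring, ← hq']
        apply List.map_congr_left
        intro k _
        simp only [Function.comp_apply]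
        congr 1
        · push_cast; ring
        · push_cast; ring_nf
    · rw [if_neg h]
      have hq : PySem.Int.floordiv (n - x) m = 0 := by
        rw [PySem.Int.floordiv_eq_iff_of_pos (by omega)]
        constructor <;> nlinarith
      rw [hq]
      norm_num [List.range_one]
      congr 1
      omega

-- ---- B side: the problems of page c among 1..n form one contiguous range ----
theorem filter_key_pyRange (m : Int) (hm : 1 ≤ m) (c : Int) (hc : 0 ≤ c) :
    ∀ (nN : Nat),
      (PySem.List.pyRange 1 ((nN : Int) + 1) 1).filter
          (fun j => PySem.Int.floordiv (j - 1) m == c) =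
        PySem.List.pyRange (c * m + 1) (min ((c + 1) * m) (nN : Int) + 1) 1 := by
  intro nN
  induction nN with
  | zero =>
    have h2 : min ((c + 1) * m) ((0:Nat) : Int) + 1 ≤ c * m + 1 := by
      have hmin : min ((c + 1) * m) ((0:Nat) : Int) ≤ 0 := by simp
      nlinarith [hmin, mul_nonneg hc (show (0:Int) ≤ m by omega)]
    rw [pyRange_empty 1 _ (by norm_num), List.filter_nil, pyRange_empty _ _ h2]
  | succ n ihn =>
    set d := PySem.Int.floordiv ((n : Int)) m with hdd
    have hd := (PySem.Int.floordiv_eq_iff_of_pos (a := (n : Int)) (b := m) (q := d) (by omega)).mp rfl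
    push_cast
    rw [PySem.List.pyRange_one_succ_right (show (1:Int) ≤ (n : Int) + 1 by omega),
        List.filter_append, ihn]
    by_cases hcd : d = c
    · have hkc : PySem.Int.floordiv ((n : Int)) m = c := by rw [← hdd]; exact hcd
      have hfil : List.filter (fun j => PySem.Int.floordiv (j - 1) m == c) [(n : Int) + 1] = [(n : Int) + 1] := by
        simp [hkc]
      subst hcd
      rw [hfil, min_eq_right (le_of_lt hd.2), min_eq_right (by omega : (n : Int) + 1 ≤ (d + 1) * m),
          PySem.List.pyRange_one_succ_right (by omega : d * m + 1 ≤ (n : Int) + 1)]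
    · have hkc : ¬ PySem.Int.floordiv ((n : Int)) m = c := by rw [← hdd]; exact hcd
      have hfil : List.filter (fun j => PySem.Int.floordiv (j - 1) m == c) [(n : Int) + 1] = [] := by
        simp [hkc]
      rw [hfil, List.append_nil]
      rcases lt_or_gt_of_ne hcd with hlt | hgt
      · have h1 : (n : Int) + 1 ≤ c * m := by
          nlinarith [hd.2, mul_le_mul_of_nonneg_right (show d + 1 ≤ c by omega) (show (0:Int) ≤ m by omega)]
        have e1 : min ((c + 1) * m) ((n : Int)) + 1 ≤ c * m + 1 := by
          have := min_le_right ((c + 1) * m) ((n : Int)); omega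
        have e2 : min ((c + 1) * m) ((n : Int) + 1) + 1 ≤ c * m + 1 := by
          have := min_le_right ((c + 1) * m) ((n : Int) + 1); omega
        rw [pyRange_empty _ _ e1, pyRange_empty _ _ e2]
      · have h1 : (c + 1) * m ≤ (n : Int) := by
          nlinarith [hd.1, mul_le_mul_of_nonneg_right (show c + 1 ≤ d by omega) (show (0:Int) ≤ m by omega)]
        rw [min_eq_left h1, min_eq_left (by omega : (c + 1) * m ≤ (n : Int) + 1)]

-- ---- B side: the dict's keys appear in order 0, 1, …, (n-1)//m ----
theorem keys_closed (m : Int) (hm : 1 ≤ m) :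
    ∀ (nN : Nat), 1 ≤ nN →
      PySem.Set.ofList ((PySem.List.pyRange 1 ((nN : Int) + 1) 1).map
          (fun j => PySem.Int.floordiv (j - 1) m)) =
        (List.range ((PySem.Int.floordiv ((nN : Int) - 1) m).toNat + 1)).map
          (fun (k : Nat) => (k : Int)) := by
  intro nN
  induction nN with
  | zero => omega
  | succ n ihn =>
    intro _
    by_cases hn : 1 ≤ n
    · set q := PySem.Int.floordiv ((n : Int) - 1) m with hq
      have hqb := (PySem.Int.floordiv_eq_iff_of_pos (a := (n : Int) - 1) (b := m) (q := q) (by omega)).mp rfl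
      have hq0 : 0 ≤ q := by nlinarith [hqb.1, hqb.2]
      set d := PySem.Int.floordiv ((n : Int)) m with hdd
      have hdb := (PySem.Int.floordiv_eq_iff_of_pos (a := (n : Int)) (b := m) (q := d) (by omega)).mp rfl
      have hcases : d = q ∨ d = q + 1 := by
        have h1 : q < d + 1 :=
          lt_of_mul_lt_mul_right
            (show q * m < (d + 1) * m by nlinarith [hqb.1, hdb.2]) (show (0:Int) ≤ m by omega)
        have h2 : d < q + 2 :=
          lt_of_mul_lt_mul_right
            (show d * m < (q + 2) * m by nlinarith [hdb.1, hqb.2]) (show (0:Int) ≤ m by omega)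
        omega
      push_cast
      rw [PySem.List.pyRange_one_succ_right (show (1:Int) ≤ (n : Int) + 1 by omega),
          List.map_append, PySem.Set.ofList_eq_foldl, List.foldl_append,
          ← PySem.Set.ofList_eq_foldl, ihn hn]
      have hkey : PySem.Int.floordiv ((n : Int) + 1 - 1) m = d := by rw [hdd]; norm_num
      simp only [List.map_cons, List.map_nil, List.foldl_cons, List.foldl_nil, hkey]
      rcases hcases with hc | hc
      · have hmem : d ∈ (List.range (q.toNat + 1)).map (fun (k : Nat) => (k : Int)) := by
          simp only [List.mem_map]
          exact ⟨q.toNat, by simp only [List.mem_range]; omega, by omega⟩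
        rw [show PySem.Set.add ((List.range (q.toNat + 1)).map (fun (k : Nat) => (k : Int))) d
              = (List.range (q.toNat + 1)).map (fun (k : Nat) => (k : Int)) from by
            simp [PySem.Set.add, PySem.Set.contains, hmem]]
        rw [show d.toNat = q.toNat by omega]
      · have hnmem : ¬ d ∈ (List.range (q.toNat + 1)).map (fun (k : Nat) => (k : Int)) := by
          simp only [List.mem_map, List.mem_range]
          rintro ⟨k, hk, hkd⟩; omega
        rw [show PySem.Set.add ((List.range (q.toNat + 1)).map (fun (k : Nat) => (k : Int))) d
              = (List.range (q.toNat + 1)).map (fun (k : Nat) => (k : Int)) ++ [d] from by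
            simp [PySem.Set.add, PySem.Set.contains, hnmem]]
        rw [show d.toNat + 1 = (q.toNat + 1) + 1 by omega,
            show List.range ((q.toNat + 1) + 1) = List.range (q.toNat + 1) ++ [q.toNat + 1] from
              List.range_succ, List.map_append]
        congr 1
        simp only [List.map_cons, List.map_nil]
        congr 1
        omega
    · have hn0 : n = 0 := by omega
      subst hn0
      have h0 : PySem.Int.floordiv 0 m = 0 := by
        rw [PySem.Int.floordiv_eq_iff_of_pos (by omega)]; constructor <;> nlinarith
      norm_num [h0]
      rw [show PySem.List.pyRange 1 2 1 = [1] from by decide]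
      norm_num [h0, PySem.Set.ofList, PySem.Set.add]

-- ---- glue: one chapter computed A's way equals one chapter computed B's way ----
theorem chapter_eq (i m : Int) (h : 1 ≤ m ∨ i ≤ m) :
    solveLoopA (i.toNat + 1) i m 1 = solveChapterB i m := by
  by_cases hi : 1 ≤ i
  · have hm : 1 ≤ m := by rcases h with hm | him <;> omega
    obtain ⟨nN, hnN⟩ : ∃ nN : Nat, (nN : Int) = i := ⟨i.toNat, by omega⟩
    subst hnN
    have hn1 : 1 ≤ nN := by exact_mod_cast hi
    -- A side to closed form
    rw [loopA_closed m hm (((nN : Int)).toNat + 1) (nN : Int) 1 (by exact_mod_cast hi) (by omega)]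
    -- B side
    have hfold : (PySem.List.pyRange 1 ((nN : Int) + 1) 1).foldl
        (fun d j => d.modify (PySem.Int.floordiv (j - 1) m) [] (fun v => v ++ [j]))
        (PySem.Dict.empty : PySem.Dict Int (List Int))
        = ((PySem.List.pyRange 1 ((nN : Int) + 1) 1).map
            (fun j => (PySem.Int.floordiv (j - 1) m, j))).foldl
            (fun d p => d.modify p.1 [] (fun v => v ++ [p.2])) PySem.Dict.empty := by
      rw [List.foldl_map]
    set buckets := (PySem.List.pyRange 1 ((nN : Int) + 1) 1).foldl
        (fun d j => d.modify (PySem.Int.floordiv (j - 1) m) [] (fun v => v ++ [j]))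
        (PySem.Dict.empty : PySem.Dict Int (List Int)) with hbuckets
    have hkeys : buckets.keys = (List.range ((PySem.Int.floordiv ((nN : Int) - 1) m).toNat + 1)).map
        (fun (k : Nat) => (k : Int)) := by
      rw [hbuckets, PySem.Dict.keys_foldl_modify_key _ (fun j => PySem.Int.floordiv (j - 1) m) []
            (fun _ j => (fun v => v ++ [j])) PySem.Dict.empty, PySem.Dict.keys_empty]
      exact keys_closed m hm nN hn1
    have hnodup : buckets.keys.Nodup := by
      rw [hbuckets]
      exact PySem.Dict.nodup_keys_foldl_modify_key _ _ _ _ _ (by rw [PySem.Dict.keys_empty]; exact List.nodup_nil)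
    have hgetD : ∀ c : Int, 0 ≤ c →
        buckets.getD c [] = PySem.List.pyRange (c * m + 1) (min ((c + 1) * m) (nN : Int) + 1) 1 := by
      intro c hc
      rw [hfold, PySem.Dict.getD_foldl_modify_append, PySem.Dict.getD_empty,
          List.nil_append, List.filter_map]
      rw [show ((fun p : Int × Int => p.1 == c) ∘ fun j => (PySem.Int.floordiv (j - 1) m, j))
            = (fun j => PySem.Int.floordiv (j - 1) m == c) from rfl]
      rw [List.map_map, show ((fun p : Int × Int => p.2) ∘ fun j => (PySem.Int.floordiv (j - 1) m, j))
            = id from rfl, List.map_id]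
      exact filter_key_pyRange m hm c hc nN
    have hvalues : buckets.values =
        (List.range ((PySem.Int.floordiv ((nN : Int) - 1) m).toNat + 1)).map
          (fun (k : Nat) => PySem.List.pyRange ((k : Int) * m + 1)
            (min (((k : Int) + 1) * m) (nN : Int) + 1) 1) := by
      rw [PySem.Dict.values_eq_map_keys buckets hnodup [], hkeys, List.map_map]
      apply List.map_congr_left
      intro k _
      simp only [Function.comp_apply]
      exact hgetD (k : Int) (by positivity)
    show _ = solveChapterB (nN : Int) m
    rw [solveChapterB, ← hbuckets]
    simp only [hvalues]
    rw [show ((List.range ((PySem.Int.floordiv ((nN : Int) - 1) m).toNat + 1)).map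
          (fun (k : Nat) => PySem.List.pyRange ((k : Int) * m + 1)
            (min (((k : Int) + 1) * m) (nN : Int) + 1) 1)).isEmpty = false from by
        simp [List.range_succ]]
    rw [if_neg (by simp : ¬ (false = true))]
    apply List.map_congr_left
    intro k _
    congr 1
    · ring
    · rw [← min_add_add_right]
      congr 1
      ring
  · have hcond : ¬ (1 + m ≤ i) := by rcases h with h' | h' <;> omega
    have hA : solveLoopA (i.toNat + 1) i m 1 = [PySem.List.pyRange 1 (i + 1) 1] := by
      rw [show i.toNat + 1 = 0 + 1 by omega]
      simp only [solveLoopA, if_neg hcond]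
    rw [hA, pyRange_empty 1 (i + 1) (by omega)]
    rw [solveChapterB, pyRange_empty 1 (i + 1) (by omega)]
    rfl

-- ===== VERDICT (by name: the statement is the Claim_ definition above) =====
theorem solve_spec : Claim_equal_solve := by
  intro l m hdom hpre
  unfold Spec_solve solve solve_alt
  induction l using List.reverseRecOn with
  | nil => rfl
  | append_singleton t a ih =>
    have hdt : Dom_solve t m := by
      unfold Dom_solve at hdom ⊢; simp only [List.all_append] at hdom
      simp only [Bool.and_eq_true] at hdom ⊢; exact ⟨hdom.1.1, hdom.2⟩
    have hpt : Pre_solve t m := by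
      rcases hpre with hm | hall
      · exact Or.inl hm
      · exact Or.inr fun i hi => hall i (by simp [hi])
    simp only [List.foldl_append, List.foldl_cons, List.foldl_nil]
    rw [ih hdt hpt, chapter_eq a m (by rcases hpre with hm | hall
                                       · exact Or.inl hm
                                       · exact Or.inr (hall a (by simp)))]
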